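-- pv_equiv track=rewrite | github.com/evandrofr/CodeInterview | PI08B_pond_sizes/solution.py | compute_pond_sizes
-- ===== SOURCE A (Python) =====
-- from typing import List
--
-- def compute_pond_sizes(land: List[List[int]]) -> List[int]:
--     sizes = []
--     n_rows = len(land)
--     n_cols = len(land[0])
--     def compute_size(row: int, col: int, size: int) -> int:
--         if row == -1 or col == -1 or row == n_rows or col == n_cols:
--             return 0
--         if land[row][col] == 0:
--             land[row][col] = -1 # mark as visited
--             size = 1
--             for next_row in [row-1, row, row+1]:
--                 for next_col in [col-1, col, col+1]:
--                     size += compute_size(next_row, next_col, size)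
--             return size
--         return 0
--
--
--     for row in range(n_rows):
--         for col in range(n_cols):
--             size = compute_size(row, col, 0)
--             if size > 0:
--                 sizes.append(size)
--     for i, row in enumerate(land):
--         land[i] = [0 if r == -1 else r for r in row]
--     return sizes
-- ===== SOURCE B (Python) =====
-- from typing import List
--
-- def compute_pond_sizes(land: List[List[int]]) -> List[int]:
--     # Iterative flood fill with an explicit stack and a visited set; land is not mutated.
--     n_rows = len(land)
--     n_cols = len(land[0])
--     visited = set()
--     sizes = []
--     for row in range(n_rows):
--         for col in range(n_cols):
--             if land[row][col] == 0 and (row, col) not in visited: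
--                 stack = [(row, col)]
--                 count = 0
--                 while stack:
--                     r, c = stack.pop()
--                     if 0 <= r < n_rows and 0 <= c < n_cols \
--                             and land[r][c] == 0 and (r, c) not in visited:
--                         visited.add((r, c))
--                         count += 1
--                         for nr in (r + 1, r, r - 1):
--                             for nc in (c + 1, c, c - 1):
--                                 stack.append((nr, nc))
--                 sizes.append(count)
--     return sizes
-- ===== Notes on version B (the rewrite author's own statement) =====
-- stated objective: faster
-- what changed: A's recursive compute_size helper that marks visited cells by mutating the grid to -1 (plus a final pass restoring -1 to 0) is replaced by an iterative flood fill: an explicit stack seeded with each fresh zero cell and a visited set, counting pops; the grid is never mutated and no restore pass is needed.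
import Mathlib
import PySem

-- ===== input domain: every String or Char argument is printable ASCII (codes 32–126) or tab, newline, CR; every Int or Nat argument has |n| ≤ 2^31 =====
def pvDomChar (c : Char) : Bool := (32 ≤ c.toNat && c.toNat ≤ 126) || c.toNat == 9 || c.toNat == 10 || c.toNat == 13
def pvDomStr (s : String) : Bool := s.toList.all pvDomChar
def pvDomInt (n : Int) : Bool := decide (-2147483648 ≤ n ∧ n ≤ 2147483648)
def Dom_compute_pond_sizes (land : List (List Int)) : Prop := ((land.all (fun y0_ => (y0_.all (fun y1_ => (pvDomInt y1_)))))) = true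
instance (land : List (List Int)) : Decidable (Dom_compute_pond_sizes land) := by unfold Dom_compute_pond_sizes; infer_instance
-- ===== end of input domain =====

-- B replaces A's recursive, grid-mutating DFS by an iterative flood fill with an explicit
-- stack and a visited set (alternative decomposition); equivalence is about the RETURN value:
-- A mutates its argument in place (marks cells -1, then rebuilds each row), B does not mutate.

-- ===== PORT A =====
-- land[r][c] ; call sites admitted by Pre_ always have 0 ≤ r < len(land), 0 ≤ c < len(land[r]),
-- so the defaults are never read there
def pvCellGet (g : List (List Int)) (r c : Int) : Int :=
  ((PySem.List.pyGet? ((PySem.List.pyGet? g r).getD []) c).getD 1)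

-- land[r][c] = v ; indices are non-negative and in range at each call site admitted by Pre_
def pvCellSet (g : List (List Int)) (r c v : Int) : List (List Int) :=
  match PySem.List.pyGet? g r with
  | none => g
  | some row => g.set r.toNat (row.set c.toNat v)

-- the 9 pairs the two nested 'for next_row/next_col' loops run through, in their order
def pvNbrs (r c : Int) : List (Int × Int) :=
  [r - 1, r, r + 1].flatMap (fun nr => [c - 1, c, c + 1].map (fun nc => (nr, nc)))

-- compute_size; the Nat fuel only makes the recursion total (the outer call passes more fuel
-- than the recursion depth ever reaches, see compute_pond_sizes); structure is A's code:
-- bounds guard, zero test, mark -1, then 'size += compute_size(...)' over the 9 neighbours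
def pvComputeSizeA (nRows nCols : Int) : Nat → List (List Int) → Int → Int → Int → List (List Int) × Int
  | 0, g, _, _, _ => (g, 0)
  | fuel + 1, g, row, col, _size =>
    if row == -1 || col == -1 || row == nRows || col == nCols then (g, 0)
    else if pvCellGet g row col == 0 then
      (pvNbrs row col).foldl
        (fun st rc =>
          let out := pvComputeSizeA nRows nCols fuel st.1 rc.1 rc.2 st.2
          (out.1, st.2 + out.2))
        (pvCellSet g row col (-1), 1)
    else (g, 0)

def compute_pond_sizes (land : List (List Int)) : List Int :=
  let nRows : Int := PySem.List.len land
  let nCols : Int := PySem.List.len ((PySem.List.pyGet? land 0).getD [])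
  -- fuel: strictly more than the number of cells, hence than any recursion depth
  let fuel : Nat := land.length * (land.headD []).length + 1
  let fin :=
    ((PySem.List.pyRange 0 nRows 1).flatMap
        (fun r => (PySem.List.pyRange 0 nCols 1).map (fun c => (r, c)))).foldl
      (fun (st : List (List Int) × List Int) rc =>
        let out := pvComputeSizeA nRows nCols fuel st.1 rc.1 rc.2 0
        (out.1, if out.2 > 0 then st.2 ++ [out.2] else st.2))
      (land, [])
  -- land[i] = [0 if r == -1 else r for r in row]  (mutation only; the return value is sizes)
  let _restored := fin.1.map (fun row => row.map (fun v => if v == -1 then 0 else v))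
  fin.2

-- ===== PORT B =====
-- the guard of B's while-loop body: 0 <= r < n_rows and 0 <= c < n_cols and land[r][c] == 0
-- and (r, c) not in visited
def pvOk (land : List (List Int)) (nRows nCols : Int) (vis : List (Int × Int)) (x : Int × Int) : Bool :=
  decide (0 ≤ x.1) && decide (x.1 < nRows) && decide (0 ≤ x.2) && decide (x.2 < nCols)
    && (pvCellGet land x.1 x.2 == 0) && !(vis.contains x)

-- B's while-loop.  The Lean list is the Python stack REVERSED (head = top of stack): Source B
-- pushes the 9 neighbours in the order (r+1,c+1) … (r-1,c-1), so after reversal the popped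
-- order is exactly pvNbrs.  Fuel only makes the loop total; the caller passes more than the
-- loop can ever iterate.
def pvFloodB (land : List (List Int)) (nRows nCols : Int) :
    Nat → List (Int × Int) → List (Int × Int) → Int → List (Int × Int) × Int
  | 0, _, vis, cnt => (vis, cnt)
  | _ + 1, [], vis, cnt => (vis, cnt)
  | fuel + 1, x :: stack, vis, cnt =>
    if pvOk land nRows nCols vis x then
      pvFloodB land nRows nCols fuel (pvNbrs x.1 x.2 ++ stack) (PySem.Set.add vis x) (cnt + 1)
    else
      pvFloodB land nRows nCols fuel stack vis cnt

def compute_pond_sizes_alt (land : List (List Int)) : List Int :=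
  let nRows : Int := PySem.List.len land
  let nCols : Int := PySem.List.len ((PySem.List.pyGet? land 0).getD [])
  let fuel : Nat := 9 * (land.length * (land.headD []).length) + 2
  (((PySem.List.pyRange 0 nRows 1).flatMap
        (fun r => (PySem.List.pyRange 0 nCols 1).map (fun c => (r, c)))).foldl
      (fun (st : List (Int × Int) × List Int) rc =>
        if pvCellGet land rc.1 rc.2 == 0 && !(st.1.contains rc) then
          let out := pvFloodB land nRows nCols fuel [rc] st.1 0
          (out.1, st.2 ++ [out.2])
        else st)
      (PySem.Set.empty, [])).2

-- ===== PRECONDITION & SPEC =====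
-- Pre_ excludes exactly the inputs where A raises IndexError: the empty grid (len(land[0]))
-- and grids where some row is shorter than row 0 (land[row][col] with col < len(land[0])).
def Pre_compute_pond_sizes (land : List (List Int)) : Prop :=
  land ≠ [] ∧ ∀ row ∈ land, (land.headD []).length ≤ row.length
instance (land : List (List Int)) : Decidable (Pre_compute_pond_sizes land) := by
  unfold Pre_compute_pond_sizes; infer_instance

def pvWitness_compute_pond_sizes : List (List Int) := [[0, 1], [1, 0]]

def Spec_compute_pond_sizes (land : List (List Int)) (out : List Int) : Prop := out = compute_pond_sizes_alt land
instance (land : List (List Int)) (out : List Int) : Decidable (Spec_compute_pond_sizes land out) := by unfold Spec_compute_pond_sizes; infer_instance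

-- ===== CLAIM (what is proved, stated in full; the proofs are below) =====
def Claim_equal_compute_pond_sizes : Prop := ∀ (land : List (List Int)), Dom_compute_pond_sizes land → Pre_compute_pond_sizes land → Spec_compute_pond_sizes land (compute_pond_sizes land)

-- ===== LEMMAS AND PROOFS =====

-- countP is strictly monotone when the weaker predicate holds and the stronger fails at a member
theorem pv_countP_lt {α : Type} (l : List α) (p q : α → Bool)
    (himp : ∀ a ∈ l, q a = true → p a = true) (x : α) (hx : x ∈ l)
    (hp : p x = true) (hq : q x = false) : l.countP q < l.countP p := by
  induction l with
  | nil => simp at hx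
  | cons y t ih =>
    simp only [List.countP_cons]
    rcases List.mem_cons.mp hx with hx | hx
    · subst hx
      have h2 : t.countP q ≤ t.countP p :=
        List.countP_mono_left (fun a ha hqa => himp a (List.mem_cons_of_mem _ ha) hqa)
      simp [hp, hq]; omega
    · have h1 := ih (fun a ha hqa => himp a (List.mem_cons_of_mem _ ha) hqa) hx
      have h3 : (if q y = true then 1 else 0) ≤ (if p y = true then 1 else 0) := by
        by_cases h : q y = true
        · simp [h, himp y List.mem_cons_self h]
        · simp only [h, Bool.false_eq_true, if_false]; omega
      omega

-- the in-bounds cells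
def pvAllCells (nRows nCols : Int) : List (Int × Int) :=
  (List.range nRows.toNat).flatMap
    (fun (r : Nat) => (List.range nCols.toNat).map (fun (c : Nat) => ((r : Int), (c : Int))))

-- the cells still to visit: in-bounds cells with value 0 not yet in vis
def pvZ (land : List (List Int)) (nRows nCols : Int) (vis : List (Int × Int)) : Nat :=
  (pvAllCells nRows nCols).countP
    (fun x => (pvCellGet land x.1 x.2 == 0) && !(vis.contains x))

theorem pv_mem_pvAllCells {nRows nCols : Int} {x : Int × Int} (h1 : 0 ≤ x.1) (h2 : x.1 < nRows)
    (h3 : 0 ≤ x.2) (h4 : x.2 < nCols) : x ∈ pvAllCells nRows nCols := by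
  unfold pvAllCells
  rw [List.mem_flatMap]
  refine ⟨x.1.toNat, ?_, ?_⟩
  · rw [List.mem_range]; omega
  · rw [List.mem_map]
    exact ⟨x.2.toNat, by rw [List.mem_range]; omega,
      by simp [Int.toNat_of_nonneg h1, Int.toNat_of_nonneg h3]⟩

theorem pv_contains_of_add_false {vis : List (Int × Int)} {x a : Int × Int}
    (h : List.contains (PySem.Set.add vis x) a = false) : vis.contains a = false := by
  simp only [List.contains_eq_mem, decide_eq_false_iff_not] at h ⊢
  intro hm
  exact h ((PySem.Set.mem_add vis x a).mpr (Or.inl hm))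

theorem pv_contains_add (s : List (Int × Int)) (x y : Int × Int) :
    List.contains (PySem.Set.add s x) y = (List.contains s y || y == x) := by
  rw [Bool.eq_iff_iff]; simp [PySem.Set.mem_add s x y]

theorem pvZ_add_lt {land : List (List Int)} {nRows nCols : Int} {vis : List (Int × Int)}
    {x : Int × Int} (hok : pvOk land nRows nCols vis x = true) :
    pvZ land nRows nCols (PySem.Set.add vis x) < pvZ land nRows nCols vis := by
  unfold pvOk at hok
  simp only [Bool.and_eq_true, decide_eq_true_eq, Bool.not_eq_true'] at hok
  obtain ⟨⟨⟨⟨⟨h1, h2⟩, h3⟩, h4⟩, h5⟩, h6⟩ := hok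
  apply pv_countP_lt _ _ _ ?_ x (pv_mem_pvAllCells h1 h2 h3 h4)
  · simp only [List.contains_eq_mem, decide_eq_false_iff_not] at h6
    simp [h5, h6]
  · simp
  · intro a _ hq
    simp only [Bool.and_eq_true, Bool.not_eq_true'] at hq ⊢
    exact ⟨hq.1, pv_contains_of_add_false hq.2⟩

theorem pvZ_add_le (land : List (List Int)) (nRows nCols : Int) (vis : List (Int × Int))
    (x : Int × Int) :
    pvZ land nRows nCols (PySem.Set.add vis x) ≤ pvZ land nRows nCols vis := by
  apply List.countP_mono_left
  intro a _ hq
  simp only [Bool.and_eq_true, Bool.not_eq_true'] at hq ⊢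
  exact ⟨hq.1, pv_contains_of_add_false hq.2⟩

-- the common semantics both ports are reduced to: B's loop, fuel-free
def pvIdeal (land : List (List Int)) (nRows nCols : Int) :
    List (Int × Int) → List (Int × Int) → Int → List (Int × Int) × Int
  | [], vis, cnt => (vis, cnt)
  | x :: stack, vis, cnt =>
    if h : pvOk land nRows nCols vis x = true then
      pvIdeal land nRows nCols (pvNbrs x.1 x.2 ++ stack) (PySem.Set.add vis x) (cnt + 1)
    else
      pvIdeal land nRows nCols stack vis cnt
  termination_by stack vis _ => (pvZ land nRows nCols vis, stack.length)
  decreasing_by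
  · exact Prod.Lex.left _ _ (pvZ_add_lt h)
  · exact Prod.Lex.right _ (by simp)

theorem pvIdeal_shift (land : List (List Int)) (nRows nCols : Int)
    (stack vis : List (Int × Int)) (cnt k : Int) :
    pvIdeal land nRows nCols stack vis (cnt + k)
      = ((pvIdeal land nRows nCols stack vis cnt).1,
         (pvIdeal land nRows nCols stack vis cnt).2 + k) := by
  induction stack, vis, cnt using pvIdeal.induct land nRows nCols generalizing k with
  | case1 vis cnt => simp [pvIdeal]
  | case2 x stack vis cnt hok ih =>
    rw [pvIdeal, dif_pos hok, pvIdeal, dif_pos hok]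
    have : cnt + k + 1 = (cnt + 1) + k := by ring
    rw [this, ih]
  | case3 x stack vis cnt hok ih =>
    rw [pvIdeal, dif_neg hok, pvIdeal, dif_neg hok, ih]

theorem pvIdeal_le_cnt (land : List (List Int)) (nRows nCols : Int)
    (stack vis : List (Int × Int)) (cnt : Int) :
    cnt ≤ (pvIdeal land nRows nCols stack vis cnt).2 := by
  induction stack, vis, cnt using pvIdeal.induct land nRows nCols with
  | case1 vis cnt => simp [pvIdeal]
  | case2 x stack vis cnt hok ih => rw [pvIdeal, dif_pos hok]; omega
  | case3 x stack vis cnt hok ih => rw [pvIdeal, dif_neg hok]; exact ih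

theorem pvIdeal_append (land : List (List Int)) (nRows nCols : Int)
    (a b vis : List (Int × Int)) (cnt : Int) :
    pvIdeal land nRows nCols (a ++ b) vis cnt
      = pvIdeal land nRows nCols b (pvIdeal land nRows nCols a vis cnt).1
          (pvIdeal land nRows nCols a vis cnt).2 := by
  induction a, vis, cnt using pvIdeal.induct land nRows nCols with
  | case1 vis cnt => simp [pvIdeal]
  | case2 x stack vis cnt hok ih =>
    rw [List.cons_append, pvIdeal, dif_pos hok, ← List.append_assoc, ih,
      pvIdeal, dif_pos hok]
  | case3 x stack vis cnt hok ih =>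
    rw [List.cons_append, pvIdeal, dif_neg hok, ih, pvIdeal, dif_neg hok]

theorem pvIdeal_Z_le (land : List (List Int)) (nRows nCols : Int)
    (stack vis : List (Int × Int)) (cnt : Int) :
    pvZ land nRows nCols (pvIdeal land nRows nCols stack vis cnt).1 ≤ pvZ land nRows nCols vis := by
  induction stack, vis, cnt using pvIdeal.induct land nRows nCols with
  | case1 vis cnt => simp [pvIdeal]
  | case2 x stack vis cnt hok ih =>
    rw [pvIdeal, dif_pos hok]
    exact le_trans ih (pvZ_add_le land nRows nCols vis x)
  | case3 x stack vis cnt hok ih => rw [pvIdeal, dif_neg hok]; exact ih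

-- A's grid state after visiting the cells of vis: exactly land with vis-cells overwritten by -1
def pvMask (land : List (List Int)) (vis : List (Int × Int)) : List (List Int) :=
  land.mapIdx (fun r row => row.mapIdx (fun c v => if vis.contains ((r : Int), (c : Int)) then -1 else v))

theorem pvMask_nil (land : List (List Int)) : pvMask land [] = land := by
  unfold pvMask
  apply List.ext_getElem
  · simp
  · intro i h1 h2
    rw [List.getElem_mapIdx]
    apply List.ext_getElem <;> simp [List.getElem_mapIdx]

theorem pv_pyGet?_pvMask (land : List (List Int)) (vis : List (Int × Int)) (r : Int)
    (hr0 : 0 ≤ r) (hr : r < (land.length : Int)) :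
    PySem.List.pyGet? (pvMask land vis) r
      = some ((land[r.toNat]'(by omega)).mapIdx
          (fun c v => if vis.contains ((r.toNat : Int), (c : Int)) then -1 else v)) := by
  have hrn : r.toNat < land.length := by omega
  rw [PySem.List.pyGet?_of_nonneg _ hr0]
  unfold pvMask
  rw [List.getElem?_eq_getElem (by simpa using hrn)]
  rw [List.getElem_mapIdx]

theorem pv_cellGet_eq (land : List (List Int)) (r c : Int)
    (hr0 : 0 ≤ r) (hrn : r.toNat < land.length) (hc0 : 0 ≤ c)
    (hcn : c.toNat < (land[r.toNat]'hrn).length) :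
    pvCellGet land r c = (land[r.toNat]'hrn)[c.toNat]'hcn := by
  unfold pvCellGet
  rw [PySem.List.pyGet?_of_nonneg _ hr0, List.getElem?_eq_getElem hrn, Option.getD_some,
    PySem.List.pyGet?_of_nonneg _ hc0, List.getElem?_eq_getElem hcn, Option.getD_some]

theorem pvCellGet_pvMask (land : List (List Int)) (vis : List (Int × Int)) (r c : Int)
    (hr0 : 0 ≤ r) (hr : r < (land.length : Int)) (hc0 : 0 ≤ c)
    (hc : c < ((land.headD []).length : Int))
    (hrect : ∀ row ∈ land, (land.headD []).length ≤ row.length) :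
    pvCellGet (pvMask land vis) r c
      = if vis.contains (r, c) then -1 else pvCellGet land r c := by
  have hrn : r.toNat < land.length := by omega
  have hlen : (land.headD []).length ≤ (land[r.toNat]).length :=
    hrect _ (List.getElem_mem hrn)
  have hcn : c.toNat < (land[r.toNat]).length := by omega
  conv_lhs => unfold pvCellGet
  rw [pv_pyGet?_pvMask land vis r hr0 hr, Option.getD_some,
    PySem.List.pyGet?_of_nonneg _ hc0,
    List.getElem?_eq_getElem (by simpa using hcn), Option.getD_some, List.getElem_mapIdx]
  have hpair : (((r.toNat : Nat) : Int), ((c.toNat : Nat) : Int)) = (r, c) := by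
    simp [Int.toNat_of_nonneg hr0, Int.toNat_of_nonneg hc0]
  rw [hpair, pv_cellGet_eq land r c hr0 hrn hc0 hcn]

theorem pvCellSet_pvMask (land : List (List Int)) (vis : List (Int × Int)) (r c : Int)
    (hr0 : 0 ≤ r) (hr : r < (land.length : Int)) (hc0 : 0 ≤ c)
    (hc : c < ((land.headD []).length : Int))
    (hrect : ∀ row ∈ land, (land.headD []).length ≤ row.length) :
    pvCellSet (pvMask land vis) r c (-1) = pvMask land (PySem.Set.add vis (r, c)) := by
  have hrn : r.toNat < land.length := by omega
  have hlen : (land.headD []).length ≤ (land[r.toNat]).length :=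
    hrect _ (List.getElem_mem hrn)
  have hcn : c.toNat < (land[r.toNat]).length := by omega
  unfold pvCellSet
  rw [pv_pyGet?_pvMask land vis r hr0 hr]
  show (pvMask land vis).set r.toNat _ = _
  unfold pvMask
  apply List.ext_getElem
  · simp
  · intro i hi1 hi2
    rw [List.getElem_set]
    by_cases hir : r.toNat = i
    · subst hir
      rw [if_pos rfl, List.getElem_mapIdx]
      apply List.ext_getElem
      · simp
      · intro j hj1 hj2
        rw [List.getElem_set, List.getElem_mapIdx, List.getElem_mapIdx]
        by_cases hjc : c.toNat = j
        · subst hjc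
          rw [if_pos rfl]
          have hco : List.contains (PySem.Set.add vis (r, c)) (((r.toNat : Nat) : Int), ((c.toNat : Nat) : Int)) = true := by
            rw [pv_contains_add]
            simp [Int.toNat_of_nonneg hr0, Int.toNat_of_nonneg hc0]
          rw [if_pos hco]
        · rw [if_neg hjc]
          have hne : List.contains (PySem.Set.add vis (r, c)) (((r.toNat : Nat) : Int), ((j : Nat) : Int))
              = List.contains vis (((r.toNat : Nat) : Int), ((j : Nat) : Int)) := by
            rw [pv_contains_add]
            have : ((((r.toNat : Nat) : Int), ((j : Nat) : Int)) == (r, c)) = false := by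
              simp only [beq_eq_false_iff_ne, ne_eq, Prod.mk.injEq, not_and]
              intro _ hc'
              omega
            rw [this, Bool.or_false]
          rw [hne]
    · rw [if_neg hir, List.getElem_mapIdx, List.getElem_mapIdx]
      apply List.ext_getElem
      · simp
      · intro j hj1 hj2
        rw [List.getElem_mapIdx, List.getElem_mapIdx]
        have hne : List.contains (PySem.Set.add vis (r, c)) (((i : Nat) : Int), ((j : Nat) : Int))
            = List.contains vis (((i : Nat) : Int), ((j : Nat) : Int)) := by
          rw [pv_contains_add]
          have : ((((i : Nat) : Int), ((j : Nat) : Int)) == (r, c)) = false := by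
            simp only [beq_eq_false_iff_ne, ne_eq, Prod.mk.injEq, not_and]
            intro hr' _
            omega
          rw [this, Bool.or_false]
        rw [hne]

-- A's compute_size on the masked grid is pvIdeal on the visited set
theorem pvArel (land : List (List Int))
    (hrect : ∀ row ∈ land, (land.headD []).length ≤ row.length) (fuel : Nat) :
    ∀ (vis : List (Int × Int)) (r c s0 : Int),
      -1 ≤ r → r ≤ (land.length : Int) → -1 ≤ c → c ≤ ((land.headD []).length : Int) →
      pvZ land (land.length : Int) ((land.headD []).length : Int) vis < fuel →
      pvComputeSizeA (land.length : Int) ((land.headD []).length : Int) fuel (pvMask land vis) r c s0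
        = (pvMask land (pvIdeal land (land.length : Int) ((land.headD []).length : Int) [(r, c)] vis 0).1,
           (pvIdeal land (land.length : Int) ((land.headD []).length : Int) [(r, c)] vis 0).2) := by
  induction fuel with
  | zero => intro vis r c s0 _ _ _ _ h; omega
  | succ f ih =>
    intro vis r c s0 hr1 hr2 hc1 hc2 hfuel
    rw [pvComputeSizeA]
    by_cases hguard : (r == -1 || c == -1 || r == (land.length : Int)
        || c == ((land.headD []).length : Int)) = true
    · rw [if_pos hguard]
      simp only [Bool.or_eq_true, beq_iff_eq] at hguard
      have hok : ¬ (pvOk land (land.length : Int) ((land.headD []).length : Int) vis (r, c) = true) := by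
        unfold pvOk
        simp only [Bool.and_eq_true, decide_eq_true_eq]
        rintro ⟨⟨⟨⟨⟨k1, k2⟩, k3⟩, k4⟩, _⟩, _⟩
        rcases hguard with h | h | h | h <;> omega
      rw [pvIdeal, dif_neg hok, pvIdeal]
    · rw [if_neg hguard]
      simp only [Bool.or_eq_true, beq_iff_eq, not_or] at hguard
      obtain ⟨⟨⟨hg1, hg2⟩, hg3⟩, hg4⟩ := hguard
      have hb1 : 0 ≤ r := by omega
      have hb2 : r < (land.length : Int) := by
        rcases lt_or_eq_of_le hr2 with h | h
        · exact h
        · exact absurd h hg3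
      have hb3 : 0 ≤ c := by omega
      have hb4 : c < ((land.headD []).length : Int) := by
        rcases lt_or_eq_of_le hc2 with h | h
        · exact h
        · exact absurd h hg4
      rw [pvCellGet_pvMask land vis r c hb1 hb2 hb3 hb4 hrect]
      by_cases hv : vis.contains (r, c) = true
      · rw [if_pos hv]
        have hok : ¬ (pvOk land (land.length : Int) ((land.headD []).length : Int) vis (r, c) = true) := by
          unfold pvOk
          simp only [Bool.and_eq_true, Bool.not_eq_true']
          rintro ⟨_, hcon⟩
          simp only [List.contains_eq_mem, decide_eq_true_eq] at hv
          simp [hv] at hcon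
        rw [if_neg (by simp), pvIdeal, dif_neg hok, pvIdeal]
      · rw [if_neg hv]
        by_cases hz : (pvCellGet land r c == 0) = true
        · -- the visiting branch
          rw [if_pos hz]
          have hok : pvOk land (land.length : Int) ((land.headD []).length : Int) vis (r, c) = true := by
            unfold pvOk
            simp only [Bool.and_eq_true, decide_eq_true_eq, Bool.not_eq_true']
            exact ⟨⟨⟨⟨⟨hb1, hb2⟩, hb3⟩, hb4⟩, hz⟩, Bool.not_eq_true _ ▸ (by simpa using hv)⟩
          have hzlt := pvZ_add_lt hok
          have Hfold : ∀ (L : List (Int × Int)),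
              (∀ y ∈ L, -1 ≤ y.1 ∧ y.1 ≤ (land.length : Int) ∧ -1 ≤ y.2 ∧ y.2 ≤ ((land.headD []).length : Int)) →
              ∀ (vis2 : List (Int × Int)) (s : Int),
              pvZ land (land.length : Int) ((land.headD []).length : Int) vis2 < f →
              L.foldl (fun st rc =>
                  let out := pvComputeSizeA (land.length : Int) ((land.headD []).length : Int) f st.1 rc.1 rc.2 st.2
                  (out.1, st.2 + out.2)) (pvMask land vis2, s)
                = (pvMask land (pvIdeal land (land.length : Int) ((land.headD []).length : Int) L vis2 0).1,
                   s + (pvIdeal land (land.length : Int) ((land.headD []).length : Int) L vis2 0).2) := by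
            intro L
            induction L with
            | nil => intro _ vis2 s _; simp [pvIdeal]
            | cons y L' ihL =>
              intro hmem vis2 s hz2
              obtain ⟨yr, yc⟩ := y
              obtain ⟨hy1, hy2, hy3, hy4⟩ := hmem (yr, yc) List.mem_cons_self
              rw [List.foldl_cons]
              simp only
              rw [ih vis2 yr yc s hy1 hy2 hy3 hy4 hz2]
              simp only
              have hzle := pvIdeal_Z_le land (land.length : Int) ((land.headD []).length : Int) [(yr, yc)] vis2 0
              rw [ihL (fun a ha => hmem a (List.mem_cons_of_mem _ ha)) _ _ (by omega)]
              have happ := pvIdeal_append land (land.length : Int) ((land.headD []).length : Int) [(yr, yc)] L' vis2 0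
              rw [List.singleton_append] at happ
              rw [happ]
              have hsh := pvIdeal_shift land (land.length : Int) ((land.headD []).length : Int) L'
                (pvIdeal land (land.length : Int) ((land.headD []).length : Int) [(yr, yc)] vis2 0).1 0
                (pvIdeal land (land.length : Int) ((land.headD []).length : Int) [(yr, yc)] vis2 0).2
              rw [zero_add] at hsh
              rw [hsh]
              simp only [Prod.mk.injEq]
              refine ⟨by trivial, by ring⟩
          rw [pvCellSet_pvMask land vis r c hb1 hb2 hb3 hb4 hrect]
          have hnb : ∀ y ∈ pvNbrs r c, -1 ≤ y.1 ∧ y.1 ≤ (land.length : Int) ∧ -1 ≤ y.2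
              ∧ y.2 ≤ ((land.headD []).length : Int) := by
            intro y hy
            simp only [pvNbrs, List.mem_flatMap, List.mem_map, List.mem_cons,
              List.not_mem_nil, or_false] at hy
            obtain ⟨nr, hnr, nc, hnc, rfl⟩ := hy
            constructor
            · rcases hnr with h | h | h <;> omega
            constructor
            · rcases hnr with h | h | h <;> omega
            constructor
            · rcases hnc with h | h | h <;> omega
            · rcases hnc with h | h | h <;> omega
          rw [Hfold (pvNbrs r c) hnb (PySem.Set.add vis (r, c)) 1 (by omega)]
          rw [pvIdeal, dif_pos hok, List.append_nil]
          simp only [zero_add]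
          have hsh := pvIdeal_shift land (land.length : Int) ((land.headD []).length : Int)
            (pvNbrs r c) (PySem.Set.add vis (r, c)) 0 1
          rw [zero_add] at hsh
          rw [hsh]
          simp only [Prod.mk.injEq]
          refine ⟨by trivial, by ring⟩
        · rw [if_neg hz]
          have hok : ¬ (pvOk land (land.length : Int) ((land.headD []).length : Int) vis (r, c) = true) := by
            unfold pvOk
            simp only [Bool.and_eq_true, decide_eq_true_eq]
            rintro ⟨⟨_, hz'⟩, _⟩
            exact hz hz'
          rw [pvIdeal, dif_neg hok, pvIdeal]

-- B's fueled loop is pvIdeal once the fuel exceeds what the loop can consume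
theorem pvBrel (land : List (List Int)) (nRows nCols : Int) (fuel : Nat) :
    ∀ (stack vis : List (Int × Int)) (cnt : Int),
      stack.length + 9 * pvZ land nRows nCols vis < fuel →
      pvFloodB land nRows nCols fuel stack vis cnt = pvIdeal land nRows nCols stack vis cnt := by
  induction fuel with
  | zero => intro stack vis cnt h; omega
  | succ f ih =>
    intro stack vis cnt h
    match stack, h with
    | [], _ => rw [pvFloodB, pvIdeal]
    | x :: rest, h =>
      rw [pvFloodB]
      by_cases hok : pvOk land nRows nCols vis x = true
      · rw [if_pos hok, pvIdeal, dif_pos hok]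
        apply ih
        have h9 : (pvNbrs x.1 x.2).length = 9 := by simp [pvNbrs]
        have hz := pvZ_add_lt hok
        simp only [List.length_append, h9, List.length_cons] at h ⊢
        omega
      · rw [if_neg hok, pvIdeal, dif_neg hok]
        apply ih
        simp only [List.length_cons] at h
        omega

theorem pvZ_le_cells (land : List (List Int)) (vis : List (Int × Int)) :
    pvZ land (land.length : Int) ((land.headD []).length : Int) vis
      ≤ land.length * (land.headD []).length := by
  have h1 : (pvAllCells (land.length : Int) ((land.headD []).length : Int)).length
      = land.length * (land.headD []).length := by
    simp [pvAllCells, List.length_flatMap]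
  calc pvZ land (land.length : Int) ((land.headD []).length : Int) vis
      ≤ (pvAllCells (land.length : Int) ((land.headD []).length : Int)).length :=
        List.countP_le_length
    _ = land.length * (land.headD []).length := h1

-- the two outer double loops, related step by step through pvMask / pvIdeal
theorem pvOuter (land : List (List Int))
    (hrect : ∀ row ∈ land, (land.headD []).length ≤ row.length) (fuelA fuelB : Nat)
    (hfa : land.length * (land.headD []).length < fuelA)
    (hfb : 9 * (land.length * (land.headD []).length) + 1 < fuelB) :
    ∀ (L : List (Int × Int)),
      (∀ rc ∈ L, 0 ≤ rc.1 ∧ rc.1 < (land.length : Int) ∧ 0 ≤ rc.2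
        ∧ rc.2 < ((land.headD []).length : Int)) →
      ∀ (vis : List (Int × Int)) (sizes : List Int),
      pvZ land (land.length : Int) ((land.headD []).length : Int) vis
        ≤ land.length * (land.headD []).length →
      L.foldl (fun (st : List (List Int) × List Int) rc =>
          let out := pvComputeSizeA (land.length : Int) ((land.headD []).length : Int)
            fuelA st.1 rc.1 rc.2 0
          (out.1, if out.2 > 0 then st.2 ++ [out.2] else st.2)) (pvMask land vis, sizes)
        = (pvMask land (L.foldl (fun (st : List (Int × Int) × List Int) rc =>
              if pvCellGet land rc.1 rc.2 == 0 && !(st.1.contains rc) then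
                let out := pvFloodB land (land.length : Int) ((land.headD []).length : Int)
                  fuelB [rc] st.1 0
                (out.1, st.2 ++ [out.2])
              else st) (vis, sizes)).1,
           (L.foldl (fun (st : List (Int × Int) × List Int) rc =>
              if pvCellGet land rc.1 rc.2 == 0 && !(st.1.contains rc) then
                let out := pvFloodB land (land.length : Int) ((land.headD []).length : Int)
                  fuelB [rc] st.1 0
                (out.1, st.2 ++ [out.2])
              else st) (vis, sizes)).2) := by
  intro L
  induction L with
  | nil => intro _ vis sizes _; simp
  | cons rc L' ihL =>
    intro hmem vis sizes hzc
    obtain ⟨hb1, hb2, hb3, hb4⟩ := hmem rc List.mem_cons_self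
    obtain ⟨cr, cc⟩ := rc
    rw [List.foldl_cons, List.foldl_cons]
    simp only
    rw [pvArel land hrect fuelA vis cr cc 0 (by omega) (le_of_lt hb2) (by omega)
      (le_of_lt hb4) (by omega)]
    simp only
    by_cases hg : (pvCellGet land cr cc == 0 && !(vis.contains (cr, cc))) = true
    · have hg2 := hg
      simp only [Bool.and_eq_true, Bool.not_eq_true'] at hg2
      have hok : pvOk land (land.length : Int) ((land.headD []).length : Int) vis (cr, cc) = true := by
        unfold pvOk
        simp only [Bool.and_eq_true, decide_eq_true_eq, Bool.not_eq_true']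
        exact ⟨⟨⟨⟨⟨hb1, hb2⟩, hb3⟩, hb4⟩, hg2.1⟩, hg2.2⟩
      rw [pvIdeal, dif_pos hok, List.append_nil]
      simp only [zero_add]
      have hd1 : (1 : Int) ≤ (pvIdeal land (land.length : Int) ((land.headD []).length : Int)
          (pvNbrs cr cc) (PySem.Set.add vis (cr, cc)) 1).2 :=
        pvIdeal_le_cnt land (land.length : Int) ((land.headD []).length : Int) _ _ 1
      rw [if_pos (by omega)]
      rw [if_pos hg]
      rw [pvBrel land (land.length : Int) ((land.headD []).length : Int) fuelB [(cr, cc)] vis 0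
        (by have := pvZ_le_cells land vis; simp only [List.length_cons, List.length_nil]; omega)]
      rw [pvIdeal, dif_pos hok, List.append_nil]
      simp only [zero_add]
      have hzW := pvIdeal_Z_le land (land.length : Int) ((land.headD []).length : Int)
        (pvNbrs cr cc) (PySem.Set.add vis (cr, cc)) 1
      have hzadd := pvZ_add_le land (land.length : Int) ((land.headD []).length : Int) vis (cr, cc)
      exact ihL (fun a ha => hmem a (List.mem_cons_of_mem _ ha)) _ _ (by omega)
    · have hok : ¬ (pvOk land (land.length : Int) ((land.headD []).length : Int) vis (cr, cc) = true) := by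
        unfold pvOk
        simp only [Bool.and_eq_true, decide_eq_true_eq, Bool.not_eq_true']
        rintro ⟨⟨_, hc1⟩, hc2⟩
        exact hg (by simp only [Bool.and_eq_true, Bool.not_eq_true']; exact ⟨hc1, hc2⟩)
      rw [pvIdeal, dif_neg hok, pvIdeal]
      simp only
      rw [if_neg (by omega), if_neg hg]
      exact ihL (fun a ha => hmem a (List.mem_cons_of_mem _ ha)) _ _ hzc

-- ===== VERDICT (by name: the statement is the Claim_ definition above) =====
theorem compute_pond_sizes_spec : Claim_equal_compute_pond_sizes := by
  unfold Claim_equal_compute_pond_sizes Spec_compute_pond_sizes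
  intro land _hdom hpre
  obtain ⟨hne, hrect⟩ := hpre
  cases land with
  | nil => exact absurd rfl hne
  | cons h t =>
    unfold compute_pond_sizes compute_pond_sizes_alt
    simp only [PySem.List.len_eq, PySem.List.pyGet?_zero_cons, Option.getD_some,
      List.headD_cons]
    have hrect' : ∀ row ∈ h :: t, ((h :: t).headD []).length ≤ row.length := by
      simpa using hrect
    have hmem : ∀ rc ∈ ((PySem.List.pyRange 0 ((h :: t).length : Int) 1).flatMap
        (fun r => (PySem.List.pyRange 0 (h.length : Int) 1).map (fun c => (r, c)))),
        0 ≤ rc.1 ∧ rc.1 < (((h :: t).length : Int)) ∧ 0 ≤ rc.2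
          ∧ rc.2 < ((((h :: t).headD []).length : Int)) := by
      intro rc hrc
      simp only [List.mem_flatMap, List.mem_map] at hrc
      obtain ⟨r, hr, c, hc, rfl⟩ := hrc
      rw [PySem.List.mem_pyRange_one] at hr hc
      simp only [List.headD_cons]
      exact ⟨hr.1, hr.2, hc.1, hc.2⟩
    have hout := pvOuter (h :: t) hrect'
      ((h :: t).length * h.length + 1) (9 * ((h :: t).length * h.length) + 2)
      (by simp only [List.headD_cons]; omega) (by simp only [List.headD_cons]; omega)
      _ hmem [] [] (by simpa using pvZ_le_cells (h :: t) [])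
    simp only [List.headD_cons] at hout
    rw [show (PySem.Set.empty : List (Int × Int)) = [] from rfl]
    rw [pvMask_nil] at hout
    rw [hout]
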